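-- pv_equiv track=rewrite | github.com/aws-samples/sample-zendesk-aws-support-connector | scripts/generate_secure_token.py | check_common_patterns
-- ===== SOURCE A (Python) =====
-- def check_common_patterns(token):
--     """Check if token contains common patterns that reduce security."""
--     # Check for repeating patterns
--     for length in range(1, min(8, len(token) // 2)):
--         for i in range(len(token) - 2 * length + 1):
--             pattern = token[i:i+length]
--             if pattern == token[i+length:i+2*length]:
--                 return False
--
--     # Check for sequential characters
--     sequences = ["abcdefghijklmnopqrstuvwxyz", "ABCDEFGHIJKLMNOPQRSTUVWXYZ", "0123456789"]
--     for seq in sequences: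
--         for i in range(len(seq) - 3):
--             if seq[i:i+4] in token:
--                 return False
--
--     return True
-- ===== SOURCE B (Python) =====
-- def check_common_patterns(token):
--     """Check if token contains common patterns that reduce security."""
--     n = len(token)
--     # Repeating-block phase: compare characters across the shift L instead of slicing.
--     for length in range(1, min(8, n // 2)):
--         for i in range(n - 2 * length + 1):
--             if all(token[i + j] == token[i + length + j] for j in range(length)):
--                 return False
--     # Sequential phase: pre-build the set of forbidden 4-grams, then slide over token.
--     sequences = ["abcdefghijklmnopqrstuvwxyz", "ABCDEFGHIJKLMNOPQRSTUVWXYZ", "0123456789"]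
--     forbidden = set()
--     for seq in sequences:
--         for i in range(len(seq) - 3):
--             forbidden.add(seq[i:i+4])
--     for i in range(n - 3):
--         if token[i:i+4] in forbidden:
--             return False
--     return True
-- ===== Notes on version B (the rewrite author's own statement) =====
-- stated objective: alternative
-- what changed: The repeat phase compares characters across the shift instead of comparing two slices, and the sequential phase pre-builds a set of all forbidden 4-grams and slides over the token's own 4-windows looking each up, instead of substring-searching every 4-gram in the token.
import Mathlib
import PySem

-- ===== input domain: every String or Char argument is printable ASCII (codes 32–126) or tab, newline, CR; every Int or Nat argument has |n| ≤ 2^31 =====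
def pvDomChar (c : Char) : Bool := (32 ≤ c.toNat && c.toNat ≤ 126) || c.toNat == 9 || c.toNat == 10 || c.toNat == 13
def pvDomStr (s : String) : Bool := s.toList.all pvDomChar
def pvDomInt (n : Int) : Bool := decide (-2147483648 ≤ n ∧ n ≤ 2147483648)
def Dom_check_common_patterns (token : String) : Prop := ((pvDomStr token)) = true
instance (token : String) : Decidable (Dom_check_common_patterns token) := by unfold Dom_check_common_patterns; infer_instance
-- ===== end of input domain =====

-- B keeps the same exclusive bounds but compares characters across the shift instead of
-- slicing, and replaces the per-4-gram substring searches by one pre-built set of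
-- forbidden 4-grams looked up along token's own windows (objective: alternative).

-- ===== PORT A =====
def check_common_patterns (token : String) : Bool :=
  let t := token.toList
  let n : Int := t.length
  -- for length in range(1, min(8, len(token)//2)): for i in …: if slice == slice: return False
  if (PySem.List.pyRange 1 (min 8 (PySem.Int.floordiv n 2)) 1).any (fun length =>
       (PySem.List.pyRange 0 (n - 2*length + 1) 1).any (fun i =>
         PySem.List.slice t (some i) (some (i+length)) ==
           PySem.List.slice t (some (i+length)) (some (i+2*length))))
  then false
  else
    -- for seq in sequences: for i in range(len(seq)-3): if seq[i:i+4] in token: return False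
    if ([("abcdefghijklmnopqrstuvwxyz" : String).toList,
         ("ABCDEFGHIJKLMNOPQRSTUVWXYZ" : String).toList,
         ("0123456789" : String).toList]).any (fun seq =>
         (PySem.List.pyRange 0 ((seq.length : Int) - 3) 1).any (fun i =>
           PySem.Chars.isIn (PySem.List.slice seq (some i) (some (i+4))) t))
    then false
    else true

-- ===== PORT B =====
-- forbidden = set(); for seq in sequences: for i in range(len(seq)-3): forbidden.add(seq[i:i+4])
def cpForbidden : PySem.Set (List Char) :=
  ([("abcdefghijklmnopqrstuvwxyz" : String).toList,
    ("ABCDEFGHIJKLMNOPQRSTUVWXYZ" : String).toList,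
    ("0123456789" : String).toList]).foldl (fun s seq =>
      (PySem.List.pyRange 0 ((seq.length : Int) - 3) 1).foldl
        (fun s i => s.add (PySem.List.slice seq (some i) (some (i+4)))) s)
    PySem.Set.empty

def check_common_patterns_alt (token : String) : Bool :=
  let t := token.toList
  let n : Int := t.length
  -- for length in …: for i in …: if all(token[i+j] == token[i+length+j] for j in range(length)): return False
  if (PySem.List.pyRange 1 (min 8 (PySem.Int.floordiv n 2)) 1).any (fun length =>
       (PySem.List.pyRange 0 (n - 2*length + 1) 1).any (fun i =>
         (PySem.List.pyRange 0 length 1).all (fun j =>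
           PySem.List.pyGet? t (i+j) == PySem.List.pyGet? t (i+length+j))))
  then false
  else
    -- for i in range(n - 3): if token[i:i+4] in forbidden: return False
    if (PySem.List.pyRange 0 (n - 3) 1).any (fun i =>
         cpForbidden.contains (PySem.List.slice t (some i) (some (i+4))))
    then false
    else true

-- ===== PRECONDITION & SPEC =====
def Spec_check_common_patterns (token : String) (out : Bool) : Prop := out = check_common_patterns_alt token
instance (token : String) (out : Bool) : Decidable (Spec_check_common_patterns token out) := by unfold Spec_check_common_patterns; infer_instance

-- ===== CLAIM (what is proved, stated in full; the proofs are below) =====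
def Claim_equal_check_common_patterns : Prop := ∀ (token : String), Dom_check_common_patterns token → Spec_check_common_patterns token (check_common_patterns token)

-- ===== LEMMAS AND PROOFS =====

-- the forbidden 4-grams as a flat list, in generation order
def cpGrams : List (List Char) :=
  ([("abcdefghijklmnopqrstuvwxyz" : String).toList,
    ("ABCDEFGHIJKLMNOPQRSTUVWXYZ" : String).toList,
    ("0123456789" : String).toList]).flatMap (fun seq =>
      (PySem.List.pyRange 0 ((seq.length : Int) - 3) 1).map
        (fun i => PySem.List.slice seq (some i) (some (i+4))))

-- the grams are pairwise distinct, so the set's underlying list is exactly cpGrams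
set_option maxRecDepth 20000 in
lemma cpForbidden_eq : cpForbidden = cpGrams := by decide

set_option maxRecDepth 20000 in
lemma cpGrams_length : ∀ g ∈ cpGrams, g.length = 4 := by decide

-- slice-equality of the two adjacent blocks ↔ character-by-character agreement across the shift
lemma window_eq_iff (t : List Char) (a l : Nat) :
    (List.take l (List.drop a t) = List.take l (List.drop (a+l) t)) ↔
    (∀ j : Nat, j < l → t[a+j]? = t[a+l+j]?) := by
  constructor
  · intro he j hj
    have h1 : (List.take l (List.drop a t))[j]? = t[a+j]? := by
      simp [hj, List.getElem?_drop]
    have h2 : (List.take l (List.drop (a+l) t))[j]? = t[a+l+j]? := by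
      simp [hj, List.getElem?_drop]
    rw [← h1, ← h2, he]
  · intro hp
    apply List.ext_getElem?
    intro j
    by_cases hj : j < l
    · simpa [List.getElem?_take, hj, List.getElem?_drop] using hp j hj
    · simp [hj]

-- a length-4 list is an infix iff it equals one of the 4-windows
lemma infix4_iff (g t : List Char) (hg : g.length = 4) :
    g <:+: t ↔ ∃ a : Nat, a + 4 ≤ t.length ∧ List.take 4 (List.drop a t) = g := by
  constructor
  · rintro ⟨s, u, rfl⟩
    refine ⟨s.length, by rw [List.length_append, List.length_append, hg]; omega, ?_⟩
    rw [List.append_assoc, List.drop_left, ← hg, List.take_left]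
  · rintro ⟨a, ha, rfl⟩
    exact ⟨t.take a, t.drop (a + 4), by
      rw [← List.drop_drop, List.append_assoc, List.take_append_drop, List.take_append_drop]⟩

-- phase 1: the two inner tests agree on every (length, i) the loops visit
lemma phase1_eq (t : List Char) :
    ((PySem.List.pyRange 1 (min 8 (PySem.Int.floordiv (t.length : Int) 2)) 1).any (fun length =>
       (PySem.List.pyRange 0 ((t.length : Int) - 2*length + 1) 1).any (fun i =>
         PySem.List.slice t (some i) (some (i+length)) ==
           PySem.List.slice t (some (i+length)) (some (i+2*length)))))
    = ((PySem.List.pyRange 1 (min 8 (PySem.Int.floordiv (t.length : Int) 2)) 1).any (fun length =>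
       (PySem.List.pyRange 0 ((t.length : Int) - 2*length + 1) 1).any (fun i =>
         (PySem.List.pyRange 0 length 1).all (fun j =>
           PySem.List.pyGet? t (i+j) == PySem.List.pyGet? t (i+length+j))))) := by
  apply PySem.List.any_congr_mem
  intro L hL
  apply PySem.List.any_congr_mem
  intro i hi
  rw [PySem.List.mem_pyRange_iff_of_pos (by norm_num)] at hL hi
  obtain ⟨hL1, hL2, -⟩ := hL
  obtain ⟨hi1, hi2, -⟩ := hi
  -- name the natural versions
  obtain ⟨l, rfl⟩ : ∃ l : Nat, L = (l : Int) := ⟨L.toNat, (Int.toNat_of_nonneg (by omega)).symm⟩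
  obtain ⟨a, rfl⟩ : ∃ a : Nat, i = (a : Int) := ⟨i.toNat, (Int.toNat_of_nonneg hi1).symm⟩
  have e1 : PySem.List.slice t (some (a : Int)) (some ((a : Int) + (l : Int))) =
      List.take l (List.drop a t) := PySem.List.slice_natCast_add t a l
  have e2 : PySem.List.slice t (some ((a : Int) + (l : Int))) (some ((a : Int) + 2*(l : Int))) =
      List.take l (List.drop (a + l) t) := by
    have : ((a : Int) + (l : Int)) = ((a + l : Nat) : Int) := by push_cast; ring
    rw [this]
    have : ((a : Int) + 2*(l : Int)) = (((a + l) : Nat) : Int) + ((l : Nat) : Int) := by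
      push_cast; ring
    rw [this]
    exact PySem.List.slice_natCast_add t (a + l) l
  rw [Bool.eq_iff_iff, beq_iff_eq, e1, e2, List.all_eq_true, window_eq_iff t a l]
  constructor
  · intro hp j hj
    rw [PySem.List.mem_pyRange_iff_of_pos (by norm_num)] at hj
    obtain ⟨hj1, hj2, -⟩ := hj
    obtain ⟨b, rfl⟩ : ∃ b : Nat, j = (b : Int) := ⟨j.toNat, (Int.toNat_of_nonneg hj1).symm⟩
    have e3 : (a : Int) + (b : Int) = ((a + b : Nat) : Int) := by push_cast; ring
    have e4 : (a : Int) + (l : Int) + (b : Int) = ((a + l + b : Nat) : Int) := by push_cast; ring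
    rw [beq_iff_eq, e3, e4, PySem.List.pyGet?_natCast, PySem.List.pyGet?_natCast]
    exact hp b (by exact_mod_cast hj2)
  · intro hp b hb
    have hmem : (b : Int) ∈ PySem.List.pyRange 0 (l : Int) 1 := by
      rw [PySem.List.mem_pyRange_iff_of_pos (by norm_num)]
      exact ⟨by positivity, by exact_mod_cast hb, by simp⟩
    have := hp (b : Int) hmem
    have e3 : (a : Int) + (b : Int) = ((a + b : Nat) : Int) := by push_cast; ring
    have e4 : (a : Int) + (l : Int) + (b : Int) = ((a + l + b : Nat) : Int) := by push_cast; ring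
    rw [beq_iff_eq, e3, e4, PySem.List.pyGet?_natCast, PySem.List.pyGet?_natCast] at this
    exact this

-- phase 2: searching every gram in token ≡ looking every 4-window of token up in the set
lemma phase2_eq (t : List Char) :
    (([("abcdefghijklmnopqrstuvwxyz" : String).toList,
       ("ABCDEFGHIJKLMNOPQRSTUVWXYZ" : String).toList,
       ("0123456789" : String).toList]).any (fun seq =>
       (PySem.List.pyRange 0 ((seq.length : Int) - 3) 1).any (fun i =>
         PySem.Chars.isIn (PySem.List.slice seq (some i) (some (i+4))) t)))
    = ((PySem.List.pyRange 0 ((t.length : Int) - 3) 1).any (fun i =>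
         cpForbidden.contains (PySem.List.slice t (some i) (some (i+4))))) := by
  rw [Bool.eq_iff_iff]
  have hl : (([("abcdefghijklmnopqrstuvwxyz" : String).toList,
       ("ABCDEFGHIJKLMNOPQRSTUVWXYZ" : String).toList,
       ("0123456789" : String).toList]).any (fun seq =>
       (PySem.List.pyRange 0 ((seq.length : Int) - 3) 1).any (fun i =>
         PySem.Chars.isIn (PySem.List.slice seq (some i) (some (i+4))) t)))
      = cpGrams.any (fun g => PySem.Chars.isIn g t) := by
    rw [cpGrams, List.any_flatMap]
    simp [List.any_map, Function.comp_def]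
  rw [hl]
  simp only [List.any_eq_true, cpForbidden_eq, PySem.Set.contains_iff]
  constructor
  · rintro ⟨g, hg, hin⟩
    rw [PySem.Chars.isIn_iff_infix, infix4_iff g t (cpGrams_length g hg)] at hin
    obtain ⟨a, ha, hw⟩ := hin
    refine ⟨(a : Int), ?_, ?_⟩
    · rw [PySem.List.mem_pyRange_iff_of_pos (by norm_num)]
      refine ⟨by positivity, by omega, by simp⟩
    · have e : ((a : Int) + 4) = ((a : Int) + ((4 : Nat) : Int)) := by norm_num
      rw [e, PySem.List.slice_natCast_add, hw]
      exact hg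
  · rintro ⟨i, hi, hg⟩
    rw [PySem.List.mem_pyRange_iff_of_pos (by norm_num)] at hi
    obtain ⟨hi1, hi2, -⟩ := hi
    obtain ⟨a, rfl⟩ : ∃ a : Nat, i = (a : Int) := ⟨i.toNat, (Int.toNat_of_nonneg hi1).symm⟩
    have e : ((a : Int) + 4) = ((a : Int) + ((4 : Nat) : Int)) := by norm_num
    rw [e, PySem.List.slice_natCast_add] at hg
    refine ⟨_, hg, ?_⟩
    rw [PySem.Chars.isIn_iff_infix,
      infix4_iff _ t (cpGrams_length _ hg)]
    exact ⟨a, by omega, rfl⟩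

-- ===== VERDICT (by name: the statement is the Claim_ definition above) =====
theorem check_common_patterns_spec : Claim_equal_check_common_patterns := by
  intro token _
  show check_common_patterns token = check_common_patterns_alt token
  simp only [check_common_patterns, check_common_patterns_alt]
  rw [phase1_eq, phase2_eq]
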